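-- pv_equiv track=rewrite | github.com/IvanPenateGomez/AoC-2024 | 16/day 16.py | count_reachable_nodes
-- ===== SOURCE A (Python) =====
-- def count_reachable_nodes(prev_nodes, end_node):
--     stack = [end_node]
--     visited = set(stack)
--
--     while stack:
--         node = stack.pop()
--         for neighbor in prev_nodes.get(node, []):
--             if neighbor not in visited:
--                 visited.add(neighbor)
--                 stack.append(neighbor)
--     return len(set((x, y) for x, y, _ in visited))
-- ===== SOURCE B (Python) =====
-- def count_reachable_nodes(prev_nodes, end_node):
--     # Fixed-point saturation: no stack/queue at all.  Repeatedly sweep the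
--     # adjacency items, adding every predecessor of an already-reached node,
--     # until a whole sweep changes nothing.
--     reached = {end_node}
--     changed = True
--     while changed:
--         changed = False
--         for node, nbrs in prev_nodes.items():
--             if node in reached:
--                 for nb in nbrs:
--                     if nb not in reached:
--                         reached.add(nb)
--                         changed = True
--     return len({(x, y) for x, y, _ in reached})
-- ===== Notes on version B (the rewrite author's own statement) =====
-- stated objective: alternative
-- what changed: A's worklist DFS (pop a stack, push unseen predecessors) is replaced by fixed-point saturation: repeated whole sweeps over the dict items that add predecessors of already-reached nodes until a sweep changes nothing; no stack or queue is maintained.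
import Mathlib
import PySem

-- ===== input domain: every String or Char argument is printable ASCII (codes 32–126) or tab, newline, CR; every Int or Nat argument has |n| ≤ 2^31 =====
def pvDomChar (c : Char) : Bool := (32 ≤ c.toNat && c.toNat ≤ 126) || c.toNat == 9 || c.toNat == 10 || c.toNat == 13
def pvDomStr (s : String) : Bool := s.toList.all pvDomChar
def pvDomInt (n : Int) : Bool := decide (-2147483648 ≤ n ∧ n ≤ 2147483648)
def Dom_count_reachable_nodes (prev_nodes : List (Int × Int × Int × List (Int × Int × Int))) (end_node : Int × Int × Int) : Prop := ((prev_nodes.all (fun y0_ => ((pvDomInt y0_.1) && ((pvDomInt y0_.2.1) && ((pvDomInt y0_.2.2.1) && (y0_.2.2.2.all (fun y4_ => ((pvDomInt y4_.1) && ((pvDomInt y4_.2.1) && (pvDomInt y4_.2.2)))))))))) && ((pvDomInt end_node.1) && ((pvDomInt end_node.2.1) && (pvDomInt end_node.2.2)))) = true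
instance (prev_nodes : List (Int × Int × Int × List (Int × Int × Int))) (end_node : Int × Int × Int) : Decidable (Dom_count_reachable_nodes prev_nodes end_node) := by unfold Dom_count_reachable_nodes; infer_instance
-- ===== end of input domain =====

-- B replaces A's worklist DFS (pop a stack, push unseen predecessors) by fixed-point
-- saturation: whole sweeps over the dict items until a sweep changes nothing.

-- ===== PORT A =====
def pvKeyed (prev_nodes : List (Int × Int × Int × List (Int × Int × Int))) :
    List ((Int × Int × Int) × List (Int × Int × Int)) :=
  prev_nodes.map (fun p => ((p.1, p.2.1, p.2.2.1), p.2.2.2))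
def pvNbrs (prev_nodes : List (Int × Int × Int × List (Int × Int × Int)))
    (n : Int × Int × Int) : List (Int × Int × Int) :=
  PySem.Dict.getD (PySem.Dict.mk (pvKeyed prev_nodes)) n []
def pvFlat (prev_nodes : List (Int × Int × Int × List (Int × Int × Int))) :
    List (Int × Int × Int) :=
  prev_nodes.flatMap (fun p => p.2.2.2)
-- A's while loop: pop the top of the stack, push unseen neighbours
-- (the fuel argument only makes the recursion total; it is proved sufficient below)
def pvGoA (prev_nodes : List (Int × Int × Int × List (Int × Int × Int))) :
    Nat → List (Int × Int × Int) → List (Int × Int × Int) → List (Int × Int × Int)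
  | 0, _, visited => visited
  | fuel + 1, stack, visited =>
    match stack with
    | [] => visited
    | node :: rest =>
      let sv := (pvNbrs prev_nodes node).foldl
        (fun (sv : List (Int × Int × Int) × List (Int × Int × Int)) nb =>
          if nb ∈ sv.2 then sv else (nb :: sv.1, PySem.Set.add sv.2 nb))
        (rest, visited)
      pvGoA prev_nodes fuel sv.1 sv.2

def count_reachable_nodes (prev_nodes : List (Int × Int × Int × List (Int × Int × Int))) (end_node : Int × Int × Int) : Int :=
  let visited := pvGoA prev_nodes ((pvFlat prev_nodes).length + 1) [end_node]
      (PySem.Set.ofList [end_node])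
  ((PySem.Set.ofList (visited.map (fun n => (n.1, n.2.1)))).length : Int)

-- ===== PORT B =====
-- B iterates prev_nodes.items(); under the assoc-list encoding these are pvKeyed prev_nodes
-- one sweep of B's for-loop over the items; state = (reached, changed), changed reset to false
def pvSweep (items : List ((Int × Int × Int) × List (Int × Int × Int)))
    (reached : List (Int × Int × Int)) : List (Int × Int × Int) × Bool :=
  items.foldl (fun rc kv =>
    if kv.1 ∈ rc.1 then
      kv.2.foldl (fun rc2 nb =>
        if nb ∈ rc2.1 then rc2 else (PySem.Set.add rc2.1 nb, true)) rc
    else rc) (reached, false)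
-- B's while-changed loop (the fuel argument only makes it total; proved sufficient below)
def pvSat (items : List ((Int × Int × Int) × List (Int × Int × Int))) :
    Nat → List (Int × Int × Int) → List (Int × Int × Int)
  | 0, r => r
  | fuel + 1, r =>
    let rc := pvSweep items r
    if rc.2 then pvSat items fuel rc.1 else rc.1

def count_reachable_nodes_alt (prev_nodes : List (Int × Int × Int × List (Int × Int × Int))) (end_node : Int × Int × Int) : Int :=
  let items := pvKeyed prev_nodes
  let reached := pvSat items ((items.flatMap (fun kv => kv.2)).length + 1)
      (PySem.Set.ofList [end_node])
  ((PySem.Set.ofList (reached.map (fun n => (n.1, n.2.1)))).length : Int)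

-- ===== PRECONDITION & SPEC =====
-- Pre_ requires the association-list keys to be distinct: automatic for the Python dict
-- argument, it excludes only duplicate-key list encodings that no Python dict produces.
def Pre_count_reachable_nodes (prev_nodes : List (Int × Int × Int × List (Int × Int × Int))) (end_node : Int × Int × Int) : Prop :=
  (prev_nodes.map (fun p => (p.1, p.2.1, p.2.2.1))).Nodup
instance (prev_nodes : List (Int × Int × Int × List (Int × Int × Int))) (end_node : Int × Int × Int) : Decidable (Pre_count_reachable_nodes prev_nodes end_node) := by unfold Pre_count_reachable_nodes; infer_instance
def pvWitness_count_reachable_nodes : (List (Int × Int × Int × List (Int × Int × Int))) × (Int × Int × Int) :=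
  ([(0, 0, 0, [(1, 1, 0)]), (1, 1, 0, [])], (0, 0, 0))

def Spec_count_reachable_nodes (prev_nodes : List (Int × Int × Int × List (Int × Int × Int))) (end_node : Int × Int × Int) (out : Int) : Prop := out = count_reachable_nodes_alt prev_nodes end_node
instance (prev_nodes : List (Int × Int × Int × List (Int × Int × Int))) (end_node : Int × Int × Int) (out : Int) : Decidable (Spec_count_reachable_nodes prev_nodes end_node out) := by unfold Spec_count_reachable_nodes; infer_instance

-- ===== CLAIM (what is proved, stated in full; the proofs are below) =====
def Claim_equal_count_reachable_nodes : Prop := ∀ (prev_nodes : List (Int × Int × Int × List (Int × Int × Int))) (end_node : Int × Int × Int), Dom_count_reachable_nodes prev_nodes end_node → Pre_count_reachable_nodes prev_nodes end_node → Spec_count_reachable_nodes prev_nodes end_node (count_reachable_nodes prev_nodes end_node)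

-- ===== LEMMAS AND PROOFS =====
-- reachability from end_node along prev_nodes edges
inductive pvReach (prev_nodes : List (Int × Int × Int × List (Int × Int × Int)))
    (e : Int × Int × Int) : (Int × Int × Int) → Prop
  | refl : pvReach prev_nodes e e
  | step {n m : Int × Int × Int} : pvReach prev_nodes e n → m ∈ pvNbrs prev_nodes n →
      pvReach prev_nodes e m
theorem pvNbrs_subset_flat (prev_nodes : List (Int × Int × Int × List (Int × Int × Int)))
    (n nb : Int × Int × Int) (h : nb ∈ pvNbrs prev_nodes n) : nb ∈ pvFlat prev_nodes := by
  induction prev_nodes with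
  | nil => simp [pvNbrs, pvKeyed, PySem.Dict.getD, PySem.Dict.get?] at h
  | cons p ps ih =>
    rw [pvNbrs, PySem.Dict.getD_eq_get?_getD, pvKeyed, List.map_cons,
      PySem.Dict.get?_mk_cons] at h
    simp only [pvFlat, List.flatMap_cons, List.mem_append]
    by_cases hk : ((p.1, p.2.1, p.2.2.1) == n) = true
    · rw [if_pos hk] at h
      simp at h
      exact Or.inl h
    · rw [if_neg hk] at h
      right
      exact ih (by rw [pvNbrs, PySem.Dict.getD_eq_get?_getD]; exact h)
theorem pv_len_le (L l : List (Int × Int × Int)) (hnd : l.Nodup) (hsub : ∀ x ∈ l, x ∈ L) :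
    l.length ≤ (PySem.Set.ofList L).length := by
  have hfs : (PySem.Set.ofList L).toFinset = L.toFinset := by
    ext x; simp [PySem.Set.mem_ofList]
  have hsub2 : l.toFinset ⊆ L.toFinset := by
    intro x hx; simp only [List.mem_toFinset] at *; exact hsub x hx
  have := Finset.card_le_card hsub2
  rw [← hfs, List.toFinset_card_of_nodup hnd,
    List.toFinset_card_of_nodup (PySem.Set.nodup_ofList _)] at this
  exact this

theorem pvFoldA_spec
    (nbs : List (Int × Int × Int)) : ∀ (rest visited : List (Int × Int × Int)), visited.Nodup →
    (∀ x ∈ rest, x ∈ visited) →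
    (let sv := nbs.foldl
      (fun (sv : List (Int × Int × Int) × List (Int × Int × Int)) nb =>
        if nb ∈ sv.2 then sv else (nb :: sv.1, PySem.Set.add sv.2 nb)) (rest, visited)
    sv.2.Nodup ∧ (∀ x ∈ sv.1, x ∈ sv.2) ∧ (∀ x ∈ visited, x ∈ sv.2) ∧
      (∀ x ∈ sv.2, x ∈ visited ∨ x ∈ nbs) ∧ (∀ nb ∈ nbs, nb ∈ sv.2) ∧
      (∀ x ∈ sv.1, x ∈ rest ∨ x ∈ nbs) ∧
      sv.1.length + visited.length = rest.length + sv.2.length ∧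
      (∀ x ∈ rest, x ∈ sv.1) ∧
      (∀ nb ∈ nbs, nb ∈ visited ∨ nb ∈ sv.1)) := by
  induction nbs with
  | nil =>
    intro rest visited hnd hsub
    exact ⟨hnd, hsub, fun x hx => hx, fun x hx => Or.inl hx, by simp, fun x hx => Or.inl hx, rfl,
      fun x hx => hx, by simp⟩
  | cons nb nbs ih =>
    intro rest visited hnd hsub
    simp only [List.foldl_cons]
    by_cases hmem : nb ∈ visited
    · rw [if_pos hmem]
      obtain ⟨c1, c2, c3, c4, c5, c6, c7, c8, c9⟩ := ih rest visited hnd hsub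
      refine ⟨c1, c2, c3,
        fun x hx => (c4 x hx).imp id (List.mem_cons_of_mem _), ?_,
        fun x hx => (c6 x hx).imp id (List.mem_cons_of_mem _), c7, c8, ?_⟩
      · intro y hy
        rcases List.mem_cons.1 hy with h | h
        · exact c3 _ (h ▸ hmem)
        · exact c5 _ h
      · intro y hy
        rcases List.mem_cons.1 hy with h | h
        · exact Or.inl (h ▸ hmem)
        · exact c9 _ h
    · rw [if_neg hmem]
      have hadd : PySem.Set.add visited nb = visited ++ [nb] := by
        simp [PySem.Set.add, hmem]
      rw [hadd]
      have hnd' : (visited ++ [nb]).Nodup := by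
        rw [List.nodup_append]
        refine ⟨hnd, List.nodup_singleton nb, ?_⟩
        intro a ha b hb heq
        rw [List.mem_singleton] at hb
        exact hmem ((heq.trans hb) ▸ ha)
      have hsub' : ∀ x ∈ nb :: rest, x ∈ visited ++ [nb] := by
        intro x hx
        rcases List.mem_cons.1 hx with h | h
        · simp [h]
        · exact List.mem_append_left _ (hsub x h)
      obtain ⟨c1, c2, c3, c4, c5, c6, c7, c8, c9⟩ := ih (nb :: rest) (visited ++ [nb]) hnd' hsub'
      refine ⟨c1, c2, fun x hx => c3 x (List.mem_append_left _ hx), ?_, ?_, ?_, by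
        simp only [List.length_append, List.length_cons, List.length_nil] at c7 ⊢; omega,
        fun x hx => c8 x (List.mem_cons_of_mem _ hx), ?_⟩
      · intro x hx
        rcases c4 x hx with h | h
        · rcases List.mem_append.1 h with h | h
          · exact Or.inl h
          · simp at h; simp [h]
        · simp [h]
      · intro y hy
        rcases List.mem_cons.1 hy with h | h
        · exact c3 _ (by simp [h])
        · exact c5 _ h
      · intro x hx
        rcases c6 x hx with h | h
        · rcases List.mem_cons.1 h with h | h
          · simp [h]
          · exact Or.inl h
        · simp [h]
      · intro y hy
        rcases List.mem_cons.1 hy with h | h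
        · exact Or.inr (h ▸ c8 nb (List.mem_cons_self))
        · rcases c9 _ h with h2 | h2
          · rcases List.mem_append.1 h2 with h3 | h3
            · exact Or.inl h3
            · rw [List.mem_singleton] at h3
              exact Or.inr (h3 ▸ c8 nb (List.mem_cons_self))
          · exact Or.inr h2

theorem pvGoA_spec (prev_nodes : List (Int × Int × Int × List (Int × Int × Int)))
    (e : Int × Int × Int) :
    ∀ (fuel : Nat) (stack visited : List (Int × Int × Int)),
    visited.Nodup →
    (∀ x ∈ stack, x ∈ visited) →
    (∀ x ∈ visited, pvReach prev_nodes e x) →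
    (∀ x ∈ visited, x ∈ e :: pvFlat prev_nodes) →
    (∀ x ∈ visited, x ∈ stack ∨ ∀ nb ∈ pvNbrs prev_nodes x, nb ∈ visited) →
    stack.length + (PySem.Set.ofList (e :: pvFlat prev_nodes)).length ≤ fuel + visited.length →
    (pvGoA prev_nodes fuel stack visited).Nodup ∧
      (∀ x ∈ visited, x ∈ pvGoA prev_nodes fuel stack visited) ∧
      (∀ x ∈ pvGoA prev_nodes fuel stack visited, pvReach prev_nodes e x) ∧
      (∀ x ∈ pvGoA prev_nodes fuel stack visited, ∀ nb ∈ pvNbrs prev_nodes x,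
        nb ∈ pvGoA prev_nodes fuel stack visited) := by
  intro fuel
  induction fuel with
  | zero =>
    intro stack visited hnd hsub hreach hflat hclose hfuel
    have hlen := pv_len_le (e :: pvFlat prev_nodes) visited hnd hflat
    have hstack : stack = [] := by
      cases stack with
      | nil => rfl
      | cons a t => simp only [List.length_cons] at hfuel; omega
    subst hstack
    exact ⟨hnd, fun x hx => hx, hreach,
      fun x hx nb hnb => ((hclose x hx).resolve_left (by simp)) nb hnb⟩
  | succ fuel ih =>
    intro stack visited hnd hsub hreach hflat hclose hfuel
    match stack with
    | [] =>
      exact ⟨hnd, fun x hx => hx, hreach,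
        fun x hx nb hnb => ((hclose x hx).resolve_left (by simp)) nb hnb⟩
    | node :: rest =>
      obtain ⟨c1, c2, c3, c4, c5, c6, c7, c8, c9⟩ :=
        pvFoldA_spec (pvNbrs prev_nodes node) rest visited hnd
          (fun x hx => hsub x (List.mem_cons_of_mem _ hx))
      simp only [pvGoA]
      set sv := (pvNbrs prev_nodes node).foldl
        (fun (sv : List (Int × Int × Int) × List (Int × Int × Int)) nb =>
          if nb ∈ sv.2 then sv else (nb :: sv.1, PySem.Set.add sv.2 nb))
        (rest, visited) with hsv
      have hnode : pvReach prev_nodes e node := hreach node (hsub node List.mem_cons_self)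
      have hreach' : ∀ x ∈ sv.2, pvReach prev_nodes e x := by
        intro x hx
        rcases c4 x hx with h | h
        · exact hreach x h
        · exact pvReach.step hnode h
      have hflat' : ∀ x ∈ sv.2, x ∈ e :: pvFlat prev_nodes := by
        intro x hx
        rcases c4 x hx with h | h
        · exact hflat x h
        · exact List.mem_cons_of_mem _ (pvNbrs_subset_flat prev_nodes node x h)
      have hclose' : ∀ x ∈ sv.2, x ∈ sv.1 ∨ ∀ nb ∈ pvNbrs prev_nodes x, nb ∈ sv.2 := by
        intro x hx
        by_cases hv : x ∈ visited
        · rcases hclose x hv with h | h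
          · rcases List.mem_cons.1 h with h | h
            · exact Or.inr (fun nb hnb => c5 nb (h ▸ hnb))
            · exact Or.inl (c8 x h)
          · exact Or.inr (fun nb hnb => c3 nb (h nb hnb))
        · rcases c4 x hx with h | h
          · exact absurd h hv
          · rcases c9 x h with h2 | h2
            · exact absurd h2 hv
            · exact Or.inl h2
      have hfuel' : sv.1.length + (PySem.Set.ofList (e :: pvFlat prev_nodes)).length ≤
          fuel + sv.2.length := by
        simp only [List.length_cons] at hfuel
        omega
      obtain ⟨d1, d2, d3, d4⟩ := ih sv.1 sv.2 c1 c2 hreach' hflat' hclose' hfuel'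
      exact ⟨d1, fun x hx => d2 x (c3 x hx), d3, d4⟩

-- --- B side ---
theorem pvKeyed_flat (l : List (Int × Int × Int × List (Int × Int × Int))) :
    (pvKeyed l).flatMap (fun kv => kv.2) = pvFlat l := by
  simp [pvKeyed, pvFlat, List.flatMap_map]

-- under distinct keys, an item's value IS the dict lookup
theorem pv_item_nbrs (l : List (Int × Int × Int × List (Int × Int × Int)))
    (hnd : (l.map (fun p => (p.1, p.2.1, p.2.2.1))).Nodup)
    (kv : (Int × Int × Int) × List (Int × Int × Int)) (h : kv ∈ pvKeyed l) :
    pvNbrs l kv.1 = kv.2 := by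
  have hk : ((PySem.Dict.mk (pvKeyed l)).keys).Nodup := by
    simpa [PySem.Dict.keys, pvKeyed, List.map_map, Function.comp] using hnd
  rw [pvNbrs]
  exact PySem.Dict.getD_of_mem_items (d := PySem.Dict.mk (pvKeyed l)) (k := kv.1) (v := kv.2)
    (by simpa using h) hk []

theorem pv_nbrs_item (l : List (Int × Int × Int × List (Int × Int × Int)))
    (k : Int × Int × Int) (h : pvNbrs l k ≠ []) :
    (k, pvNbrs l k) ∈ pvKeyed l := by
  rw [pvNbrs, PySem.Dict.getD_eq_get?_getD] at h ⊢
  cases hg : (PySem.Dict.mk (pvKeyed l)).get? k with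
  | none => rw [hg] at h; simp at h
  | some v =>
    simp only [Option.getD_some]
    simpa using PySem.Dict.mem_items_of_get?_eq_some _ hg

-- B's inner for-loop over one neighbour list
theorem pvInnerB_spec (nbs : List (Int × Int × Int)) :
    ∀ (r : List (Int × Int × Int)) (c : Bool),
    (let rc := nbs.foldl (fun rc2 nb =>
        if nb ∈ rc2.1 then rc2 else (PySem.Set.add rc2.1 nb, true)) (r, c)
    (∃ t, rc.1 = r ++ t) ∧
    (r.Nodup → rc.1.Nodup) ∧
    (∀ x ∈ rc.1, x ∈ r ∨ x ∈ nbs) ∧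
    (rc.2 = false → c = false ∧ rc.1 = r) ∧
    (c = false → rc.2 = true → r.length < rc.1.length) ∧
    (rc.2 = false → ∀ nb ∈ nbs, nb ∈ r)) := by
  induction nbs with
  | nil =>
    intro r c
    exact ⟨⟨[], by simp⟩, fun h => h, fun x hx => Or.inl hx, fun h => ⟨h, rfl⟩,
      fun hc h => absurd h (by simp [hc]), by simp⟩
  | cons nb nbs ih =>
    intro r c
    simp only [List.foldl_cons]
    by_cases hmem : nb ∈ r
    · rw [if_pos hmem]
      obtain ⟨c1, c2, c3, c4, c5, c6⟩ := ih r c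
      refine ⟨c1, c2, fun x hx => (c3 x hx).imp id (List.mem_cons_of_mem _), c4, c5, ?_⟩
      intro hf y hy
      rcases List.mem_cons.1 hy with h | h
      · exact h ▸ hmem
      · exact c6 hf y h
    · rw [if_neg hmem]
      have hadd : PySem.Set.add r nb = r ++ [nb] := by simp [PySem.Set.add, hmem]
      rw [hadd]
      obtain ⟨c1, c2, c3, c4, c5, c6⟩ := ih (r ++ [nb]) true
      obtain ⟨t, ht⟩ := c1
      refine ⟨⟨[nb] ++ t, by rw [ht, List.append_assoc]⟩, ?_, ?_, ?_, ?_, ?_⟩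
      · intro hnd
        apply c2
        rw [List.nodup_append]
        refine ⟨hnd, List.nodup_singleton nb, ?_⟩
        intro a ha b hb heq
        rw [List.mem_singleton] at hb
        exact hmem ((heq.trans hb) ▸ ha)
      · intro x hx
        rcases c3 x hx with h | h
        · rcases List.mem_append.1 h with h | h
          · exact Or.inl h
          · rw [List.mem_singleton] at h; simp [h]
        · exact Or.inr (List.mem_cons_of_mem _ h)
      · intro hf
        exact absurd ((c4 hf).1) (by simp)
      · intro _ _
        rw [ht]
        simp only [List.length_append, List.length_singleton]
        omega
      · intro hf
        exact absurd ((c4 hf).1) (by simp)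

-- B's sweep: one pass of the for-loop over all items
theorem pvSweepAux_spec (P : (Int × Int × Int) → Prop) :
    ∀ (items : List ((Int × Int × Int) × List (Int × Int × Int)))
      (r : List (Int × Int × Int)) (c : Bool),
    (∀ kv ∈ items, P kv.1 → ∀ nb ∈ kv.2, P nb) →
    (let rc := items.foldl (fun rc kv =>
        if kv.1 ∈ rc.1 then
          kv.2.foldl (fun rc2 nb =>
            if nb ∈ rc2.1 then rc2 else (PySem.Set.add rc2.1 nb, true)) rc
        else rc) (r, c)
    (∃ t, rc.1 = r ++ t) ∧
    (r.Nodup → rc.1.Nodup) ∧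
    (∀ x ∈ rc.1, x ∈ r ∨ x ∈ items.flatMap (fun kv => kv.2)) ∧
    (rc.2 = false → c = false ∧ rc.1 = r) ∧
    (c = false → rc.2 = true → r.length < rc.1.length) ∧
    (rc.2 = false → ∀ kv ∈ items, kv.1 ∈ r → ∀ nb ∈ kv.2, nb ∈ r) ∧
    ((∀ x ∈ r, P x) → ∀ x ∈ rc.1, P x)) := by
  intro items
  induction items with
  | nil =>
    intro r c _
    exact ⟨⟨[], by simp⟩, fun h => h, fun x hx => Or.inl hx, fun h => ⟨h, rfl⟩,
      fun hc h => absurd h (by simp [hc]), by simp, fun hp => hp⟩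
  | cons kv items ih =>
    intro r c hsound
    have hsound' : ∀ kv' ∈ items, P kv'.1 → ∀ nb ∈ kv'.2, P nb :=
      fun kv' h => hsound kv' (List.mem_cons_of_mem _ h)
    simp only [List.foldl_cons]
    by_cases hg : kv.1 ∈ r
    · rw [if_pos hg]
      obtain ⟨b1, b2, b3, b4, b5, b6⟩ := pvInnerB_spec kv.2 r c
      rcases hrc1 : kv.2.foldl (fun rc2 nb =>
        if nb ∈ rc2.1 then rc2 else (PySem.Set.add rc2.1 nb, true)) (r, c) with ⟨r1, c1⟩
      rw [hrc1] at b1 b2 b3 b4 b5 b6 ⊢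
      dsimp only at b1 b2 b3 b4 b5 b6
      obtain ⟨d1, d2, d3, d4, d5, d6, d7⟩ := ih r1 c1 hsound'
      obtain ⟨t1, ht1⟩ := b1
      refine ⟨?_, fun hnd => d2 (b2 hnd), ?_, ?_, ?_, ?_, ?_⟩
      · obtain ⟨t2, ht2⟩ := d1
        exact ⟨t1 ++ t2, by rw [ht2, ht1, List.append_assoc]⟩
      · intro x hx
        rcases d3 x hx with h | h
        · rcases b3 x h with h2 | h2
          · exact Or.inl h2
          · exact Or.inr (by simp only [List.flatMap_cons, List.mem_append]; exact Or.inl h2)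
        · exact Or.inr (by simp only [List.flatMap_cons, List.mem_append]; exact Or.inr h)
      · intro hf
        obtain ⟨hc1, heq1⟩ := d4 hf
        obtain ⟨hc0, heq0⟩ := b4 hc1
        exact ⟨hc0, by rw [heq1, heq0]⟩
      · intro hc hf
        rcases Bool.eq_false_or_eq_true c1 with hct | hct
        · subst hct
          have hlt := b5 hc rfl
          obtain ⟨t2, ht2⟩ := d1
          rw [ht2]
          simp only [List.length_append]
          omega
        · subst hct
          obtain ⟨_, heq0⟩ := b4 rfl
          rw [← heq0]
          exact d5 rfl hf
      · intro hf kv' hkv' hk'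
        obtain ⟨hc1, heq1⟩ := d4 hf
        obtain ⟨hc0, heq0⟩ := b4 hc1
        rcases List.mem_cons.1 hkv' with h | h
        · subst h
          intro nb hnb
          have := b6 hc1 nb hnb
          exact this
        · intro nb hnb
          have := d6 hf kv' h (by rw [heq0]; exact hk') nb hnb
          rw [heq0] at this
          exact this
      · intro hp x hx
        have hp1 : ∀ y ∈ r1, P y := by
          intro y hy
          rcases b3 y hy with h | h
          · exact hp y h
          · exact hsound kv List.mem_cons_self (hp kv.1 hg) y h
        exact d7 hp1 x hx
    · rw [if_neg hg]
      obtain ⟨d1, d2, d3, d4, d5, d6, d7⟩ := ih r c hsound'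
      refine ⟨d1, d2, ?_, d4, d5, ?_, d7⟩
      · intro x hx
        rcases d3 x hx with h | h
        · exact Or.inl h
        · exact Or.inr (by simp only [List.flatMap_cons, List.mem_append]; exact Or.inr h)
      · intro hf kv' hkv' hk'
        rcases List.mem_cons.1 hkv' with h | h
        · exact absurd (h ▸ hk') hg
        · exact d6 hf kv' h hk'

theorem pvSat_spec (prev_nodes : List (Int × Int × Int × List (Int × Int × Int)))
    (e : Int × Int × Int)
    (hnd : (prev_nodes.map (fun p => (p.1, p.2.1, p.2.2.1))).Nodup) :
    ∀ (fuel : Nat) (r : List (Int × Int × Int)),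
    r.Nodup →
    (∀ x ∈ r, pvReach prev_nodes e x) →
    (∀ x ∈ r, x ∈ e :: pvFlat prev_nodes) →
    (PySem.Set.ofList (e :: pvFlat prev_nodes)).length + 1 ≤ fuel + r.length →
    (pvSat (pvKeyed prev_nodes) fuel r).Nodup ∧
      (∀ x ∈ r, x ∈ pvSat (pvKeyed prev_nodes) fuel r) ∧
      (∀ x ∈ pvSat (pvKeyed prev_nodes) fuel r, pvReach prev_nodes e x) ∧
      (∀ x ∈ pvSat (pvKeyed prev_nodes) fuel r, ∀ nb ∈ pvNbrs prev_nodes x,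
        nb ∈ pvSat (pvKeyed prev_nodes) fuel r) := by
  intro fuel
  induction fuel with
  | zero =>
    intro r hr hreach hflat hfuel
    have := pv_len_le (e :: pvFlat prev_nodes) r hr hflat
    omega
  | succ fuel ih =>
    intro r hr hreach hflat hfuel
    have hsound : ∀ kv ∈ pvKeyed prev_nodes, pvReach prev_nodes e kv.1 →
        ∀ nb ∈ kv.2, pvReach prev_nodes e nb := by
      intro kv hkv hP nb hnb
      exact pvReach.step hP ((pv_item_nbrs prev_nodes hnd kv hkv) ▸ hnb)
    obtain ⟨b1, b2, b3, b4, b5, b6, b7⟩ :=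
      pvSweepAux_spec (pvReach prev_nodes e) (pvKeyed prev_nodes) r false hsound
    rw [← pvSweep] at b1 b2 b3 b4 b5 b6 b7
    simp only [pvSat]
    cases hc : (pvSweep (pvKeyed prev_nodes) r).2 with
    | true =>
      rw [if_pos rfl]
      have hlt := b5 rfl hc
      have hreach' := b7 hreach
      have hflat' : ∀ x ∈ (pvSweep (pvKeyed prev_nodes) r).1, x ∈ e :: pvFlat prev_nodes := by
        intro x hx
        rcases b3 x hx with h | h
        · exact hflat x h
        · rw [pvKeyed_flat] at h
          exact List.mem_cons_of_mem _ h
      obtain ⟨d1, d2, d3, d4⟩ := ih (pvSweep (pvKeyed prev_nodes) r).1 (b2 hr)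
        hreach' hflat' (by omega)
      obtain ⟨t, ht⟩ := b1
      exact ⟨d1, fun x hx => d2 x (by rw [ht]; exact List.mem_append_left _ hx), d3, d4⟩
    | false =>
      rw [if_neg (by simp)]
      obtain ⟨_, heq⟩ := b4 hc
      rw [heq]
      refine ⟨hr, fun x hx => hx, hreach, ?_⟩
      intro x hx nb hnb
      by_cases hnil : pvNbrs prev_nodes x = []
      · rw [hnil] at hnb; simp at hnb
      · have hitem := pv_nbrs_item prev_nodes x hnil
        exact b6 hc (x, pvNbrs prev_nodes x) hitem hx nb hnb

theorem pvReach_mem (prev_nodes : List (Int × Int × Int × List (Int × Int × Int)))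
    (e : Int × Int × Int) (res : List (Int × Int × Int)) (he : e ∈ res)
    (hc : ∀ x ∈ res, ∀ nb ∈ pvNbrs prev_nodes x, nb ∈ res) :
    ∀ x, pvReach prev_nodes e x → x ∈ res := by
  intro x hx
  induction hx with
  | refl => exact he
  | step _ hnb ih => exact hc _ ih _ hnb

theorem pv_count_congr (f : (Int × Int × Int) → Int × Int) (l1 l2 : List (Int × Int × Int))
    (h : ∀ x, x ∈ l1 ↔ x ∈ l2) :
    (PySem.Set.ofList (l1.map f)).length = (PySem.Set.ofList (l2.map f)).length := by
  have hmem : ∀ x, x ∈ PySem.Set.ofList (l1.map f) ↔ x ∈ PySem.Set.ofList (l2.map f) := by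
    intro x
    rw [PySem.Set.mem_ofList, PySem.Set.mem_ofList, List.mem_map, List.mem_map]
    exact ⟨fun ⟨a, ha, hfa⟩ => ⟨a, (h a).1 ha, hfa⟩, fun ⟨a, ha, hfa⟩ => ⟨a, (h a).2 ha, hfa⟩⟩
  exact ((List.perm_ext_iff_of_nodup (PySem.Set.nodup_ofList _)
    (PySem.Set.nodup_ofList _)).2 hmem).length_eq

theorem pv_mem_iff_reach_A (prev_nodes : List (Int × Int × Int × List (Int × Int × Int)))
    (e : Int × Int × Int) :
    ∀ x, x ∈ pvGoA prev_nodes ((pvFlat prev_nodes).length + 1) [e] (PySem.Set.ofList [e]) ↔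
      pvReach prev_nodes e x := by
  have hof : PySem.Set.ofList [e] = [e] := PySem.Set.ofList_eq_self_of_nodup [e] (List.nodup_singleton e)
  rw [hof]
  have hub := PySem.Set.length_ofList_le (e :: pvFlat prev_nodes)
  simp only [List.length_cons] at hub
  obtain ⟨c1, c2, c3, c4⟩ := pvGoA_spec prev_nodes e ((pvFlat prev_nodes).length + 1) [e] [e]
    (by simp) (fun x hx => hx) (by simp [pvReach.refl]) (by simp) (fun x hx => Or.inl hx)
    (by simp only [List.length_cons, List.length_nil]; omega)
  intro x
  exact ⟨c3 x, pvReach_mem prev_nodes e _ (c2 e (by simp)) c4 x⟩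

theorem pv_mem_iff_reach_B (prev_nodes : List (Int × Int × Int × List (Int × Int × Int)))
    (e : Int × Int × Int)
    (hnd : (prev_nodes.map (fun p => (p.1, p.2.1, p.2.2.1))).Nodup) :
    ∀ x, x ∈ pvSat (pvKeyed prev_nodes)
        (((pvKeyed prev_nodes).flatMap (fun kv => kv.2)).length + 1)
        (PySem.Set.ofList [e]) ↔ pvReach prev_nodes e x := by
  have hof : PySem.Set.ofList [e] = [e] := PySem.Set.ofList_eq_self_of_nodup [e] (List.nodup_singleton e)
  rw [hof, pvKeyed_flat]
  have hub := PySem.Set.length_ofList_le (e :: pvFlat prev_nodes)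
  simp only [List.length_cons] at hub
  obtain ⟨c1, c2, c3, c4⟩ := pvSat_spec prev_nodes e hnd ((pvFlat prev_nodes).length + 1) [e]
    (by simp) (by simp [pvReach.refl]) (by simp)
    (by simp only [List.length_cons, List.length_nil]; omega)
  intro x
  exact ⟨c3 x, pvReach_mem prev_nodes e _ (c2 e (by simp)) c4 x⟩

-- ===== VERDICT (by name: the statement is the Claim_ definition above) =====
theorem count_reachable_nodes_spec : Claim_equal_count_reachable_nodes := by
  intro prev_nodes end_node _ hpre
  unfold Spec_count_reachable_nodes count_reachable_nodes count_reachable_nodes_alt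
  have := pv_count_congr (fun n => (n.1, n.2.1))
    (pvGoA prev_nodes ((pvFlat prev_nodes).length + 1) [end_node] (PySem.Set.ofList [end_node]))
    (pvSat (pvKeyed prev_nodes) (((pvKeyed prev_nodes).flatMap (fun kv => kv.2)).length + 1)
      (PySem.Set.ofList [end_node]))
    (fun x => (pv_mem_iff_reach_A prev_nodes end_node x).trans
      (pv_mem_iff_reach_B prev_nodes end_node hpre x).symm)
  exact congrArg (fun n : Nat => (n : Int)) this
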